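-- pv_equiv track=rewrite | github.com/yofn/pyacm | codeforces/stringSuffixStructure字符串后缀结构/1700/126D密码.py | f
-- ===== SOURCE A (Python) =====
-- def preZ(s):    #preprocessing by Z algo
--     n    = len(s)
--     z    = [0]*n
--     z[0] = n
--     r    = 0
--     if n==1: return z
--     while r+1<n and s[r]==s[r+1]: r+=1
--     z[1] = r #note z=length! not 0-indexed
--     l    = 1 if r>0 else 0
--     for k in range(2,n):
--         bl = r+1-k  #|\beta|
--         gl = z[k-l] #|\gamma|
--         if gl<bl:
--             z[k]=z[k-l] #Case2a
--         else:
--             j=max(0,r-k+1)  #Case1 & 2b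
--             while k+j<n and s[j]==s[k+j]: j+=1
--             z[k]=j
--             l,r =k,k+j-1
--     return z
--
-- def f(s):
--     n  = len(s)
--     if n==1: return "Just a legend"
--     z    = preZ(s)
--     maxm = max(preZ(s[:-1])[1:],default=0)
--     ans  = max([z[i] for i in range(n) if z[i]<=maxm and i+z[i]==n],default=0)
--     if ans==0: return "Just a legend"
--     return s[:ans]
-- ===== SOURCE B (Python) =====
-- def f(s):
--     n = len(s)
--     mid = s[1:-1]
--     for L in range(n - 1, 0, -1):
--         if s[:L] == s[n - L:] and s[:L] in mid:
--             return s[:L]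
--     return "Just a legend"
-- ===== Notes on version B (the rewrite author's own statement) =====
-- stated objective: simpler
-- what changed: Replaced the Z-algorithm preprocessing (two preZ passes plus a filtered max over z-values) by a direct descending scan over candidate border lengths L, returning the first L with s[:L] == s[n-L:] and s[:L] contained in s[1:-1].
-- outside the precondition, e.g. on f(''): A raises IndexError, B returns 'Just a legend'
-- crash fix: A raises IndexError on the empty string (z[0] = n on an empty list); B returns its normal no-border fallback answer there. — e.g. on f(""): A raises IndexError, B returns "Just a legend"
import Mathlib
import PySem

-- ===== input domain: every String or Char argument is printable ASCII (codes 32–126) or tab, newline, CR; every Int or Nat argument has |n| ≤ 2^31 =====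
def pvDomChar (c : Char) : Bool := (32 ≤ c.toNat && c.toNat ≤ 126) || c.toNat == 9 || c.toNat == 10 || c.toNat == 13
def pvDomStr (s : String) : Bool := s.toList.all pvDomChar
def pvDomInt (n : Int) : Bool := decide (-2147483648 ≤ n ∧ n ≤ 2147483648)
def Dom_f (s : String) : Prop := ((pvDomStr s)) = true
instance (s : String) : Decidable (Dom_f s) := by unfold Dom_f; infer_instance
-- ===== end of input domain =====

-- B replaces A's Z-algorithm preprocessing by a direct descending scan over candidate
-- border lengths (prefix == suffix, containment via substring search); objective: simpler.
-- A raises IndexError on the empty string; Pre_ excludes it (see Raises_ block).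

-- ===== PORT A =====

def zExtend (t : List Char) (k : Nat) (j : Nat) : Nat :=
  if h : k + j < t.length ∧ t.getD j ' ' = t.getD (k + j) ' ' then
    zExtend t k (j + 1)
  else j
termination_by t.length - j
decreasing_by have := h.1; omega

def zStep (t : List Char) (st : List Int × Nat × Nat) (k : Nat) : List Int × Nat × Nat :=
  let z := st.1; let l := st.2.1; let r := st.2.2
  let bl : Int := (r : Int) + 1 - (k : Int)
  let gl : Int := z.getD (k - l) 0
  if gl < bl then (z.set k gl, l, r)
  else
    let j0 : Nat := if k ≤ r then r + 1 - k else 0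
    let j := zExtend t k j0
    (z.set k (j : Int), k, k + j - 1)

def preZ (t : List Char) : List Int :=
  let n := t.length
  let z := (List.replicate n (0 : Int)).set 0 (n : Int)
  if n = 1 then z else
  let r := zExtend t 1 0
  let z := z.set 1 (r : Int)
  let l : Nat := if r > 0 then 1 else 0
  ((List.range' 2 (n - 2)).foldl (zStep t) (z, l, r)).1

def f (s : String) : String :=
  let t := s.toList
  let n := t.length
  if n = 1 then "Just a legend" else
  let z := preZ t
  let maxm : Int := (PySem.List.max? (PySem.List.slice (preZ (PySem.List.slice t none (some (-1)))) (some 1) none) (fun x => x)).getD 0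
  let ans : Int := (PySem.List.max? ((List.range n).filterMap (fun i =>
      if z.getD i 0 ≤ maxm ∧ (i : Int) + z.getD i 0 = (n : Int) then some (z.getD i 0) else none)) (fun x => x)).getD 0
  if ans = 0 then "Just a legend" else PySem.Str.slice s none (some ans)

-- ===== PORT B =====
def faltLoop (t mid : List Char) : Nat → Option (List Char)
  | 0 => none
  | (L + 1) =>
    if t.take (L+1) = t.drop (t.length - (L+1)) ∧ PySem.Chars.isIn (t.take (L+1)) mid then
      some (t.take (L+1))
    else faltLoop t mid L

def f_alt (s : String) : String :=
  let t := s.toList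
  let mid := PySem.List.slice t (some 1) (some (-1))
  match faltLoop t mid (t.length - 1) with
  | some p => String.ofList p
  | none => "Just a legend"



-- ===== PRECONDITION & SPEC =====
-- Pre_f excludes only the empty string, on which A raises IndexError (z[0] = n on an empty list).
def Pre_f (s : String) : Prop := s ≠ ""
instance (s : String) : Decidable (Pre_f s) := by unfold Pre_f; infer_instance

def pvWitness_f : String := "aabaa"

-- A raises IndexError on the empty string; B returns its normal no-border fallback answer there.
def Raises_f (s : String) : Prop := s = ""
instance (s : String) : Decidable (Raises_f s) := by unfold Raises_f; infer_instance

def pvRaiseWitness_f : String := ""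
def pvRaiseWitnessOut_f : String := "Just a legend"

def Spec_f (s : String) (out : String) : Prop := out = f_alt s
instance (s : String) (out : String) : Decidable (Spec_f s out) := by unfold Spec_f; infer_instance

-- ===== CLAIM (what is proved, stated in full; the proofs are below) =====
def Claim_equal_f : Prop := ∀ (s : String), Dom_f s → Pre_f s → Spec_f s (f s)
def Claim_raises_f : Prop := (∀ (s : String), Dom_f s → Raises_f s → ¬ Pre_f s) ∧
  (Dom_f (pvRaiseWitness_f) ∧ Raises_f (pvRaiseWitness_f) ∧ f_alt (pvRaiseWitness_f) = pvRaiseWitnessOut_f)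

-- ===== LEMMAS AND PROOFS =====
def lcp : List Char → List Char → Nat
  | a :: as, b :: bs => if a = b then lcp as bs + 1 else 0
  | _, _ => 0

theorem lcp_le_right : ∀ (a b : List Char), lcp a b ≤ b.length := by
  intro a
  induction a with
  | nil => intro b; cases b <;> simp [lcp]
  | cons x as ih =>
    intro b
    cases b with
    | nil => simp [lcp]
    | cons y bs =>
      simp only [lcp]
      split
      · simpa using ih bs
      · simp

theorem lcp_le_iff : ∀ (a b : List Char) (L : Nat),
    L ≤ lcp a b ↔ L ≤ a.length ∧ L ≤ b.length ∧ a.take L = b.take L := by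
  intro a
  induction a with
  | nil =>
    intro b L
    cases b <;> cases L <;> simp [lcp]
  | cons x as ih =>
    intro b L
    cases b with
    | nil => cases L <;> simp [lcp]
    | cons y bs =>
      cases L with
      | zero => simp
      | succ L =>
        simp only [lcp, List.take_succ_cons, List.length_cons]
        by_cases hxy : x = y
        · subst hxy
          rw [if_pos rfl]
          simp only [Nat.succ_le_succ_iff, List.cons.injEq, true_and, ih bs L]
        · simp only [if_neg hxy, List.cons.injEq]
          constructor
          · omega
          · rintro ⟨-, -, h, -⟩; exact absurd h hxy

theorem lcp_mismatch : ∀ (a b : List Char), lcp a b < a.length → lcp a b < b.length →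
    a[lcp a b]? ≠ b[lcp a b]? := by
  intro a
  induction a with
  | nil => intro b h; simp at h
  | cons x as ih =>
    intro b h1 h2
    cases b with
    | nil => simp at h2
    | cons y bs =>
      by_cases hxy : x = y
      · subst hxy
        have e : lcp (x :: as) (x :: bs) = lcp as bs + 1 := by simp [lcp]
        rw [e] at h1 h2 ⊢
        simpa using ih bs (by simpa using h1) (by simpa using h2)
      · simp only [lcp, if_neg hxy] at *
        simpa using hxy

theorem lcp_self : ∀ (a : List Char), lcp a a = a.length := by
  intro a; induction a with
  | nil => simp [lcp]
  | cons x as ih => simp [lcp, ih]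
def Zm (t : List Char) (i : Nat) : Nat := lcp t (t.drop i)

theorem Zm_le (t : List Char) (i : Nat) : Zm t i ≤ t.length - i := by
  have := lcp_le_right t (t.drop i)
  simpa [Zm] using this

theorem Zm_zero (t : List Char) : Zm t 0 = t.length := by
  simp [Zm, lcp_self]

theorem take_eq_of_matches (a b : List Char) (L : Nat)
    (h : ∀ i, i < L → a[i]? = b[i]?) : a.take L = b.take L := by
  apply List.ext_getElem?
  intro i
  by_cases hi : i < L
  · rw [List.getElem?_take, List.getElem?_take, if_pos hi, if_pos hi]; exact h i hi
  · rw [List.getElem?_take_eq_none (by omega), List.getElem?_take_eq_none (by omega)]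

theorem matches_of_take_eq (a b : List Char) (L : Nat)
    (h : a.take L = b.take L) (i : Nat) (hi : i < L) : a[i]? = b[i]? := by
  have := congrArg (fun l => l[i]?) h
  simpa [List.getElem?_take, hi] using this

-- j < Zm t i → characters match
theorem Zm_match (t : List Char) (i j : Nat) (hj : j < Zm t i) : t[j]? = t[i + j]? := by
  have h1 : j + 1 ≤ lcp t (t.drop i) := hj
  rw [lcp_le_iff] at h1
  have := matches_of_take_eq _ _ _ h1.2.2 j (by omega)
  rwa [List.getElem?_drop] at this

theorem Zm_ge (t : List Char) (i L : Nat) (hL : L ≤ t.length - i)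
    (h : ∀ j, j < L → t[j]? = t[i + j]?) : L ≤ Zm t i := by
  rw [Zm, lcp_le_iff]
  refine ⟨by omega, by simpa using hL, ?_⟩
  apply take_eq_of_matches
  intro j hj
  rw [List.getElem?_drop]
  exact h j hj

theorem Zm_mismatch (t : List Char) (i : Nat) (hi : Zm t i < t.length - i) :
    t[Zm t i]? ≠ t[i + Zm t i]? := by
  have hz : Zm t i = lcp t (t.drop i) := rfl
  have hlen : (t.drop i).length = t.length - i := by simp
  have h := lcp_mismatch t (t.drop i) (by omega) (by omega)
  rw [List.getElem?_drop] at h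
  exact h

theorem zExtend_eq (t : List Char) (k : Nat) (hk : 1 ≤ k) :
    ∀ j, j ≤ Zm t k → zExtend t k j = Zm t k := by
  intro j hj
  induction hm : Zm t k - j generalizing j with
  | zero =>
    have hjz : j = Zm t k := by omega
    have hcond : ¬ (k + j < t.length ∧ t.getD j ' ' = t.getD (k + j) ' ') := by
      rintro ⟨h1, h2⟩
      have hlt : Zm t k < t.length - k := by omega
      apply Zm_mismatch t k hlt
      have e1 : t[j]? = some (t.getD j ' ') := by
        rw [List.getD_eq_getElem?_getD]
        cases h : t[j]? with
        | none => rw [List.getElem?_eq_none_iff] at h; omega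
        | some c => simp
      have e2 : t[k + j]? = some (t.getD (k + j) ' ') := by
        rw [List.getD_eq_getElem?_getD]
        cases h : t[k + j]? with
        | none => rw [List.getElem?_eq_none_iff] at h; omega
        | some c => simp
      rw [hjz] at e1 e2
      rw [e1, e2]
      rw [hjz] at h2
      rw [h2]
    rw [zExtend, dif_neg hcond]
    exact hjz
  | succ m ih =>
    have hjlt : j < Zm t k := by omega
    have hmatch := Zm_match t k j hjlt
    have hkj : k + j < t.length := by have := Zm_le t k; omega
    rw [zExtend, dif_pos]
    · exact ih (j + 1) (by omega) (by omega)
    · refine ⟨hkj, ?_⟩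
      have hjn : j < t.length := by omega
      rw [List.getD_eq_getElem?_getD, List.getD_eq_getElem?_getD, hmatch]
def ZInv (t : List Char) (st : List Int × Nat × Nat) (k : Nat) : Prop :=
  st.1.length = t.length ∧
  (∀ i, i < k → st.1[i]? = some ((Zm t i : Int))) ∧
  (∀ i, k ≤ i → i < t.length → st.1[i]? = some 0) ∧
  st.2.1 < k ∧
  (st.2.1 = 0 → st.2.2 = 0) ∧
  (1 ≤ st.2.1 → st.2.2 + 1 = st.2.1 + Zm t st.2.1)

theorem zStep_inv (t : List Char) (z : List Int) (l r : Nat) (k : Nat)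
    (hk2 : 2 ≤ k) (hkn : k < t.length) (h : ZInv t (z, l, r) k) :
    ZInv t (zStep t (z, l, r) k) (k + 1) := by
  obtain ⟨hlen, hz, hz0, hlk, hl0, hl1⟩ := h
  simp only at hlen hz hz0 hlk hl0 hl1
  by_cases hcase : (z.getD (k - l) 0) < ((r : Int) + 1 - (k : Int))
  · -- Case 2a: copy z[k-l]
    have hl : 1 ≤ l := by
      by_contra h0
      have hl0' : l = 0 := by omega
      have hr0 : r = 0 := hl0 hl0'
      have : z.getD (k - l) 0 = 0 := by
        rw [List.getD_eq_getElem?_getD, hz0 (k - l) (by omega) (by omega)]; rfl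
      rw [this, hr0] at hcase
      omega
    have hkl : k - l < k := by omega
    have hgl : z.getD (k - l) 0 = ((Zm t (k - l) : Int)) := by
      rw [List.getD_eq_getElem?_getD, hz (k - l) hkl]; rfl
    have hr1 : r + 1 = l + Zm t l := hl1 hl
    have hZll := Zm_le t l
    have hrn : r < t.length := by omega
    have hZl : r + 1 - l = Zm t l := by omega
    have hkg : k + Zm t (k - l) ≤ r := by
      rw [hgl] at hcase; omega
    have box : ∀ m, m < Zm t l → t[m]? = t[l + m]? := fun m hm => Zm_match t l m hm
    have claimA : ∀ i, i < Zm t (k - l) → t[i]? = t[k + i]? := by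
      intro i hi
      have h1 : t[i]? = t[(k - l) + i]? := Zm_match t (k - l) i hi
      have h2 : t[(k - l) + i]? = t[l + ((k - l) + i)]? := box _ (by omega)
      have : l + ((k - l) + i) = k + i := by omega
      rw [h1, h2, this]
    have hup : Zm t k ≤ Zm t (k - l) := by
      by_contra hcon
      have hm := Zm_match t k (Zm t (k - l)) (by omega)
      have hmm := Zm_mismatch t (k - l) (by omega)
      have h2 : t[(k - l) + Zm t (k - l)]? = t[l + ((k - l) + Zm t (k - l))]? :=
        box _ (by omega)
      have he : l + ((k - l) + Zm t (k - l)) = k + Zm t (k - l) := by omega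
      rw [h2, he] at hmm
      exact hmm hm
    have hdown : Zm t (k - l) ≤ Zm t k := by
      apply Zm_ge t k _ (by omega) claimA
    have hZk : Zm t k = Zm t (k - l) := by omega
    have hstep : zStep t (z, l, r) k = (z.set k (z.getD (k - l) 0), l, r) := by
      simp only [zStep]
      rw [if_pos hcase]
    rw [hstep]
    refine ⟨by simpa using hlen, ?_, ?_, Nat.lt_succ_of_lt hlk, hl0, hl1⟩
    · intro i hi
      by_cases hik : i = k
      · subst hik
        rw [List.getElem?_set_self (by omega), hgl, hZk]
      · rw [List.getElem?_set_ne (by omega)]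
        exact hz i (by omega)
    · intro i hi1 hi2
      rw [List.getElem?_set_ne (by omega)]
      exact hz0 i (by omega) hi2
  · -- naive extension case
    have hj0 : (if k ≤ r then r + 1 - k else 0) ≤ Zm t k := by
      by_cases hkr : k ≤ r
      · rw [if_pos hkr]
        have hl : 1 ≤ l := by
          by_contra h0
          have : r = 0 := hl0 (by omega)
          omega
        have hkl : k - l < k := by omega
        have hgl : z.getD (k - l) 0 = ((Zm t (k - l) : Int)) := by
          rw [List.getD_eq_getElem?_getD, hz (k - l) hkl]; rfl
        have hr1 : r + 1 = l + Zm t l := hl1 hl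
        have hZll := Zm_le t l
        have hrn : r < t.length := by omega
        have hb : r + 1 - k ≤ Zm t (k - l) := by
          rw [hgl] at hcase; omega
        have box : ∀ m, m < Zm t l → t[m]? = t[l + m]? := fun m hm => Zm_match t l m hm
        apply Zm_ge t k _ (by omega)
        intro i hi
        have h1 : t[i]? = t[(k - l) + i]? := Zm_match t (k - l) i (by omega)
        have h2 : t[(k - l) + i]? = t[l + ((k - l) + i)]? := box _ (by omega)
        have he : l + ((k - l) + i) = k + i := by omega
        rw [h1, h2, he]
      · rw [if_neg hkr]; omega
    have hj : zExtend t k (if k ≤ r then r + 1 - k else 0) = Zm t k :=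
      zExtend_eq t k (by omega) _ hj0
    have hstep : zStep t (z, l, r) k =
        (z.set k ((Zm t k : Int)), k, k + Zm t k - 1) := by
      simp only [zStep]
      rw [if_neg hcase, hj]
    rw [hstep]
    refine ⟨by simpa using hlen, ?_, ?_, Nat.lt_succ_self k, ?_, ?_⟩
    · intro i hi
      by_cases hik : i = k
      · subst hik
        rw [List.getElem?_set_self (by omega)]
      · rw [List.getElem?_set_ne (by omega)]
        exact hz i (by omega)
    · intro i hi1 hi2
      rw [List.getElem?_set_ne (by omega)]
      exact hz0 i (by omega) hi2
    · intro h0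
      simp only at h0
      omega
    · intro _
      exact (by omega : (k + Zm t k - 1) + 1 = k + Zm t k)
theorem foldl_zinv (t : List Char) : ∀ (m a : Nat) (st : List Int × Nat × Nat),
    2 ≤ a → a + m ≤ t.length → ZInv t st a →
    ZInv t ((List.range' a m).foldl (zStep t) st) (a + m) := by
  intro m
  induction m with
  | zero => intro a st _ _ h; simpa using h
  | succ m ih =>
    intro a st ha hm h
    rw [List.range'_succ, List.foldl_cons]
    obtain ⟨z, l, r⟩ := st
    have h1 : ZInv t (zStep t (z, l, r) a) (a + 1) :=
      zStep_inv t z l r a ha (by omega) h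
    have := ih (a + 1) (zStep t (z, l, r) a) (by omega) (by omega) h1
    have he : a + 1 + m = a + (m + 1) := by omega
    rwa [he] at this

theorem preZ_spec (t : List Char) (ht : 1 ≤ t.length) :
    ∀ i, i < t.length → (preZ t)[i]? = some ((Zm t i : Int)) := by
  intro i hi
  by_cases h1 : t.length = 1
  · have hi0 : i = 0 := by omega
    subst hi0
    simp only [preZ, h1, if_true]
    rw [List.getElem?_set_self (by simp), Zm_zero, h1]
  · have hn2 : 2 ≤ t.length := by omega
    have hr1 : zExtend t 1 0 = Zm t 1 := zExtend_eq t 1 (by omega) 0 (by omega)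
    have hinv0 : ZInv t
        (((List.replicate t.length (0 : Int)).set 0 (t.length : Int)).set 1 ((zExtend t 1 0 : Nat) : Int),
          if zExtend t 1 0 > 0 then 1 else 0, zExtend t 1 0) 2 := by
      refine ⟨by simp, ?_, ?_, ?_, ?_, ?_⟩
      · intro i' hi'
        interval_cases i'
        · rw [List.getElem?_set_ne (by omega), List.getElem?_set_self (by simp; omega)]
          rw [Zm_zero]
        · rw [List.getElem?_set_self (by simp; omega), hr1]
      · intro i' hi1 hi2
        rw [List.getElem?_set_ne (by omega), List.getElem?_set_ne (by omega)]
        simp [hi2]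
      · simp only
        split <;> omega
      · simp only
        split
        · omega
        · intro _; omega
      · simp only
        split
        · intro _
          omega
        · intro hc; omega
    have hfold := foldl_zinv t (t.length - 2) 2 _ (by omega) (by omega) hinv0
    have he : 2 + (t.length - 2) = t.length := by omega
    rw [he] at hfold
    have hval := hfold.2.1 i hi
    simp only [preZ, if_neg h1]
    exact hval
theorem zStep_length (t : List Char) (st : List Int × Nat × Nat) (k : Nat) :
    ((zStep t st k).1).length = st.1.length := by
  obtain ⟨z, l, r⟩ := st
  simp only [zStep]
  split <;> simp

theorem foldl_zStep_length (t : List Char) (ks : List Nat) :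
    ∀ st, ((ks.foldl (zStep t) st).1).length = st.1.length := by
  induction ks with
  | nil => intro st; rfl
  | cons k ks ih =>
    intro st
    rw [List.foldl_cons, ih, zStep_length]

theorem preZ_length (t : List Char) : (preZ t).length = t.length := by
  simp only [preZ]
  split
  · simp
  · rw [foldl_zStep_length]; simp

def QB (t mid : List Char) (L : Nat) : Bool :=
  decide (t.take L = t.drop (t.length - L)) && PySem.Chars.isIn (t.take L) mid

theorem QB_eq_true (t mid : List Char) (L : Nat) :
    QB t mid L = true ↔
      (t.take L = t.drop (t.length - L) ∧ PySem.Chars.isIn (t.take L) mid = true) := by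
  simp [QB]

theorem faltLoop_none (t mid : List Char) :
    ∀ m, (∀ L, 1 ≤ L → L ≤ m → ¬ QB t mid L = true) → faltLoop t mid m = none := by
  intro m
  induction m with
  | zero => intro _; rfl
  | succ m ih =>
    intro h
    simp only [faltLoop]
    split
    · rename_i hc
      exact absurd ((QB_eq_true t mid (m+1)).2 ⟨hc.1, hc.2⟩) (h (m + 1) (by omega) le_rfl)
    · exact ih (fun L h1 h2 => h L h1 (by omega))

theorem faltLoop_some (t mid : List Char) :
    ∀ m L, 1 ≤ L → L ≤ m → QB t mid L = true →
    (∀ L', L < L' → L' ≤ m → ¬ QB t mid L' = true) →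
    faltLoop t mid m = some (t.take L) := by
  intro m
  induction m with
  | zero => intro L h1 h2 _ _; omega
  | succ m ih =>
    intro L h1 h2 hQ hmax
    simp only [faltLoop]
    by_cases hLm : L = m + 1
    · subst hLm
      have hQ' := (QB_eq_true t mid (m+1)).1 hQ
      rw [if_pos ⟨hQ'.1, hQ'.2⟩]
    · have hne := hmax (m + 1) (by omega) le_rfl
      split
      · rename_i hc
        exact absurd ((QB_eq_true t mid (m+1)).2 ⟨hc.1, hc.2⟩) hne
      · exact ih L h1 (by omega) hQ (fun L' hl hl' => hmax L' hl (by omega))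

-- members of preZ t' dropped by one are exactly the Zm-values at positions ≥ 1
theorem zsTail_mem (t' : List Char) (h1 : 1 ≤ t'.length) :
    ∀ x ∈ (preZ t').drop 1, ∃ i, 1 ≤ i ∧ i < t'.length ∧ x = ((Zm t' i : Nat) : Int) := by
  intro x hx
  rw [List.mem_iff_getElem?] at hx
  obtain ⟨j, hj⟩ := hx
  rw [List.getElem?_drop] at hj
  have hlen : (preZ t').length = t'.length := preZ_length t'
  have hjlt : 1 + j < t'.length := by
    by_contra hc
    rw [List.getElem?_eq_none_iff.2 (by omega)] at hj
    simp at hj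
  have := preZ_spec t' h1 (1 + j) hjlt
  rw [this] at hj
  exact ⟨1 + j, by omega, hjlt, (Option.some_inj.1 hj).symm⟩

theorem zsTail_mem' (t' : List Char) (h1 : 1 ≤ t'.length) (i : Nat)
    (hi1 : 1 ≤ i) (hi2 : i < t'.length) :
    ((Zm t' i : Nat) : Int) ∈ (preZ t').drop 1 := by
  apply List.mem_of_getElem? (i := i - 1)
  rw [List.getElem?_drop]
  have he : 1 + (i - 1) = i := by omega
  rw [he]
  exact preZ_spec t' h1 i hi2

theorem maxm_le (t' : List Char) (h1 : 1 ≤ t'.length) :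
    (PySem.List.max? ((preZ t').drop 1) (fun x => x)).getD 0 ≤ (t'.length : Int) - 1 := by
  cases hm : PySem.List.max? ((preZ t').drop 1) (fun x => x) with
  | none => simp; omega
  | some m =>
    have hmem := PySem.List.max?_mem hm
    obtain ⟨i, hi1, hi2, he⟩ := zsTail_mem t' h1 m hmem
    have := Zm_le t' i
    simp only [Option.getD_some]
    subst he
    omega

theorem maxm_ge_iff (t' : List Char) (h1 : 1 ≤ t'.length) (L : Nat) (hL : 1 ≤ L) :
    ((L : Nat) : Int) ≤ (PySem.List.max? ((preZ t').drop 1) (fun x => x)).getD 0 ↔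
      ∃ i, 1 ≤ i ∧ i < t'.length ∧ L ≤ Zm t' i := by
  constructor
  · intro hle
    cases hm : PySem.List.max? ((preZ t').drop 1) (fun x => x) with
    | none =>
      rw [hm] at hle
      simp at hle
      omega
    | some m =>
      rw [hm] at hle
      simp only [Option.getD_some] at hle
      obtain ⟨i, hi1, hi2, he⟩ := zsTail_mem t' h1 m (PySem.List.max?_mem hm)
      refine ⟨i, hi1, hi2, ?_⟩
      subst he
      exact_mod_cast hle
  · rintro ⟨i, hi1, hi2, hle⟩
    have hmem := zsTail_mem' t' h1 i hi1 hi2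
    cases hm : PySem.List.max? ((preZ t').drop 1) (fun x => x) with
    | none =>
      rw [PySem.List.max?_eq_none_iff] at hm
      rw [hm] at hmem
      simp at hmem
    | some m =>
      have := PySem.List.max?_isMax hm _ hmem
      simp only [Option.getD_some]
      simp only at this
      calc ((L : Nat) : Int) ≤ ((Zm t' i : Nat) : Int) := by exact_mod_cast hle
        _ ≤ m := this

theorem border_iff (t : List Char) (i : Nat) (h1 : 1 ≤ i) (h2 : i < t.length) :
    Zm t i = t.length - i ↔ t.take (t.length - i) = t.drop i := by
  constructor
  · intro hz
    have hle : t.length - i ≤ Zm t i := by omega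
    rw [Zm, lcp_le_iff] at hle
    have hfull : List.take (t.length - i) (t.drop i) = t.drop i :=
      List.take_of_length_le (by simp)
    rw [hfull] at hle
    exact hle.2.2
  · intro he
    have hge : t.length - i ≤ Zm t i := by
      rw [Zm, lcp_le_iff]
      refine ⟨by omega, by rw [List.length_drop], ?_⟩
      rw [List.take_of_length_le (l := t.drop i) (by rw [List.length_drop])]
      exact he
    have := Zm_le t i
    omega

theorem occ_iff (t : List Char) (hn : 2 ≤ t.length) (L : Nat) (hL1 : 1 ≤ L)
    (hLn : L ≤ t.length - 1) :
    (∃ i, 1 ≤ i ∧ i < t.dropLast.length ∧ L ≤ Zm t.dropLast i) ↔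
      PySem.Chars.isIn (t.take L) (t.dropLast.drop 1) = true := by
  have ht'len : t.dropLast.length = t.length - 1 := by simp
  have ht'take : ∀ M, M ≤ t.length - 1 → t.dropLast.take M = t.take M := by
    intro M hM
    rw [List.dropLast_eq_take, List.take_take]
    congr 1
    omega
  constructor
  · rintro ⟨i, hi1, hi2, hle⟩
    rw [← PySem.Chars.exists_prefix_drop_iff_isIn]
    refine ⟨i - 1, ?_⟩
    have hdd : List.drop (i - 1) (t.dropLast.drop 1) = t.dropLast.drop i := by
      rw [List.drop_drop]
      congr 1
      omega
    rw [hdd]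
    have hZ := hle
    rw [Zm, lcp_le_iff] at hZ
    obtain ⟨hZ1, hZ2, hZ3⟩ := hZ
    have hLle : L ≤ t.length - 1 - i := by
      have := Zm_le t.dropLast i
      omega
    have htake : t.take L = List.take L (t.dropLast.drop i) := by
      rw [← hZ3, ht'take L (by omega)]
    rw [htake]
    exact List.take_prefix L _
  · intro hIn
    rw [← PySem.Chars.exists_prefix_drop_iff_isIn] at hIn
    obtain ⟨j, hpre⟩ := hIn
    have hdd : List.drop j (t.dropLast.drop 1) = t.dropLast.drop (1 + j) := List.drop_drop
    rw [hdd] at hpre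
    set i := 1 + j with hi
    have hlenL : (t.take L).length = L := by
      rw [List.length_take]
      omega
    have hlen2 : L ≤ t.dropLast.length - i := by
      have := hpre.length_le
      rw [hlenL] at this
      simp at this
      omega
    have hi2 : i < t.dropLast.length := by omega
    refine ⟨i, by omega, hi2, ?_⟩
    rw [Zm, lcp_le_iff]
    refine ⟨by omega, by simp; omega, ?_⟩
    obtain ⟨u, hu⟩ := hpre
    rw [ht'take L (by omega), ← hu, List.take_append, hlenL]
    simp
theorem mid_eq (t : List Char) :
    PySem.List.slice t (some 1) (some (-1)) = (t.dropLast).drop 1 := by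
  simp only [PySem.List.slice, PySem.List.clampIdx_neg_one]
  cases t with
  | nil => simp
  | cons x xs => simp [List.dropLast_eq_take, List.drop_take]

theorem preZ_getD (t : List Char) (hn : 1 ≤ t.length) (i : Nat) (hi : i < t.length) :
    (preZ t).getD i 0 = ((Zm t i : Nat) : Int) := by
  rw [List.getD_eq_getElem?_getD, preZ_spec t hn i hi]
  rfl

theorem cands_char (t : List Char) (hn2 : 2 ≤ t.length) (x : Int) :
    (x ∈ (List.range t.length).filterMap (fun i =>
      if (preZ t).getD i 0 ≤ (PySem.List.max? ((preZ t.dropLast).drop 1) (fun x => x)).getD 0 ∧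
         (i : Int) + (preZ t).getD i 0 = (t.length : Int)
      then some ((preZ t).getD i 0) else none)) ↔
    ∃ L, 1 ≤ L ∧ L ≤ t.length - 1 ∧ QB t (t.dropLast.drop 1) L = true ∧ x = ((L : Nat) : Int) := by
  have ht'1 : 1 ≤ t.dropLast.length := by simp; omega
  have ht'len : t.dropLast.length = t.length - 1 := by simp
  have hmaxle := maxm_le t.dropLast ht'1
  constructor
  · intro hx
    rw [List.mem_filterMap] at hx
    obtain ⟨i, hir, hgi⟩ := hx
    rw [List.mem_range] at hir
    split at hgi
    case isFalse => exact absurd hgi (by simp)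
    case isTrue hc =>
      obtain ⟨hc1, hc2⟩ := hc
      have hzi := preZ_getD t (by omega) i hir
      rw [hzi] at hc1 hc2 hgi
      have hi1 : 1 ≤ i := by
        by_contra h0
        have hi0 : i = 0 := by omega
        rw [hi0, Zm_zero] at hc1
        rw [ht'len] at hmaxle
        omega
      have hZi : Zm t i = t.length - i := by omega
      refine ⟨t.length - i, by omega, by omega, (QB_eq_true _ _ _).2 ⟨?_, ?_⟩, ?_⟩
      · have hb := (border_iff t i hi1 hir).1 hZi
        have he : t.length - (t.length - i) = i := by omega
        rw [he]
        exact hb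
      · rw [← occ_iff t hn2 (t.length - i) (by omega) (by omega)]
        rw [← maxm_ge_iff t.dropLast ht'1 (t.length - i) (by omega)]
        calc ((t.length - i : Nat) : Int) = (Zm t i : Nat) := by omega
          _ ≤ _ := hc1
      · have hx := Option.some_inj.1 hgi
        omega
  · rintro ⟨L, hL1, hLn, hQB, hxL⟩
    obtain ⟨hQ1, hQ2⟩ := (QB_eq_true _ _ _).1 hQB
    rw [List.mem_filterMap]
    refine ⟨t.length - L, List.mem_range.2 (by omega), ?_⟩
    have hi1 : 1 ≤ t.length - L := by omega
    have hir : t.length - L < t.length := by omega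
    have hzi := preZ_getD t (by omega) (t.length - L) hir
    have hZi : Zm t (t.length - L) = L := by
      have he : t.length - (t.length - L) = L := by omega
      have hb := border_iff t (t.length - L) hi1 hir
      rw [he] at hb
      exact hb.2 hQ1
    have hcond1 : ((Zm t (t.length - L) : Nat) : Int) ≤
        (PySem.List.max? ((preZ t.dropLast).drop 1) (fun x => x)).getD 0 := by
      rw [hZi]
      rw [maxm_ge_iff t.dropLast ht'1 L hL1]
      rw [occ_iff t hn2 L hL1 (by omega)]
      exact hQ2
    rw [hzi]
    rw [if_pos ⟨hcond1, by omega⟩]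
    rw [hxL]
    congr 1
    omega
theorem f_eq_falt (s : String) (hs : s.toList ≠ []) : f s = f_alt s := by
  have hn1 : 1 ≤ s.toList.length := by
    cases h : s.toList with
    | nil => exact absurd h hs
    | cons a l => simp
  by_cases h1 : s.toList.length = 1
  · have hf : f s = "Just a legend" := by
      simp only [f]
      rw [if_pos h1]
    have hfa : f_alt s = "Just a legend" := by
      simp only [f_alt]
      have h0 : s.toList.length - 1 = 0 := by omega
      rw [h0]
      rfl
    rw [hf, hfa]
  · have hn2 : 2 ≤ s.toList.length := by omega
    have ht'1 : 1 ≤ s.toList.dropLast.length := by rw [List.length_dropLast]; omega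
    simp only [f, f_alt]
    rw [if_neg h1, PySem.List.slice_to_neg_one, mid_eq]
    rw [PySem.List.slice_from _ (by norm_num), show ((1 : Int)).toNat = 1 from rfl]
    by_cases hex : ∃ L, 1 ≤ L ∧ L ≤ s.toList.length - 1 ∧ QB s.toList (s.toList.dropLast.drop 1) L = true
    · obtain ⟨L0, hL01, hL0n, hQ0⟩ := hex
      have hQx : 1 ≤ Nat.findGreatest (fun L => 1 ≤ L ∧ QB s.toList (s.toList.dropLast.drop 1) L = true) (s.toList.length - 1) ∧
          QB s.toList (s.toList.dropLast.drop 1) (Nat.findGreatest (fun L => 1 ≤ L ∧ QB s.toList (s.toList.dropLast.drop 1) L = true) (s.toList.length - 1)) = true :=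
        Nat.findGreatest_spec (P := fun L => 1 ≤ L ∧ QB s.toList (s.toList.dropLast.drop 1) L = true) hL0n ⟨hL01, hQ0⟩
      have hLxle := Nat.findGreatest_le (P := fun L => 1 ≤ L ∧ QB s.toList (s.toList.dropLast.drop 1) L = true) (s.toList.length - 1)
      have hBside : faltLoop s.toList (s.toList.dropLast.drop 1) (s.toList.length - 1) =
          some (s.toList.take (Nat.findGreatest (fun L => 1 ≤ L ∧ QB s.toList (s.toList.dropLast.drop 1) L = true) (s.toList.length - 1))) := by
        apply faltLoop_some s.toList _ _ _ hQx.1 hLxle hQx.2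
        intro L' hlt hle hQ'
        exact Nat.findGreatest_is_greatest hlt hle ⟨by omega, hQ'⟩
      rw [hBside]
      have hmemLx : ((Nat.findGreatest (fun L => 1 ≤ L ∧ QB s.toList (s.toList.dropLast.drop 1) L = true) (s.toList.length - 1) : Nat) : Int) ∈
          (List.range s.toList.length).filterMap (fun i =>
          if (preZ s.toList).getD i 0 ≤ (PySem.List.max? ((preZ s.toList.dropLast).drop 1) (fun x => x)).getD 0 ∧
             (i : Int) + (preZ s.toList).getD i 0 = (s.toList.length : Int)
          then some ((preZ s.toList).getD i 0) else none) := by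
        rw [cands_char s.toList hn2]
        exact ⟨_, hQx.1, hLxle, hQx.2, rfl⟩
      cases hm : PySem.List.max? ((List.range s.toList.length).filterMap (fun i =>
          if (preZ s.toList).getD i 0 ≤ (PySem.List.max? ((preZ s.toList.dropLast).drop 1) (fun x => x)).getD 0 ∧
             (i : Int) + (preZ s.toList).getD i 0 = (s.toList.length : Int)
          then some ((preZ s.toList).getD i 0) else none)) (fun x => x) with
      | none =>
        rw [PySem.List.max?_eq_none_iff] at hm
        rw [hm] at hmemLx
        simp at hmemLx
      | some m =>
        have hmmem := PySem.List.max?_mem hm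
        rw [cands_char s.toList hn2] at hmmem
        obtain ⟨L1, hL11, hL1n, hQ1, hmL1⟩ := hmmem
        have hL1x : L1 ≤ Nat.findGreatest (fun L => 1 ≤ L ∧ QB s.toList (s.toList.dropLast.drop 1) L = true) (s.toList.length - 1) :=
          Nat.le_findGreatest hL1n ⟨hL11, hQ1⟩
        have hxm := PySem.List.max?_isMax hm _ hmemLx
        simp only at hxm
        have hmLx : m = ((Nat.findGreatest (fun L => 1 ≤ L ∧ QB s.toList (s.toList.dropLast.drop 1) L = true) (s.toList.length - 1) : Nat) : Int) := by
          omega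
        simp only [Option.getD_some, hmLx]
        rw [if_neg (by exact_mod_cast (by omega :
          ¬ ((Nat.findGreatest (fun L => 1 ≤ L ∧ QB s.toList (s.toList.dropLast.drop 1) L = true) (s.toList.length - 1) : Nat) : Int) = 0))]
        rw [← String.toList_inj, String.toList_ofList]
        have hbr : (PySem.Str.slice s none (some ((Nat.findGreatest (fun L => 1 ≤ L ∧ QB s.toList (s.toList.dropLast.drop 1) L = true) (s.toList.length - 1) : Nat) : Int))).toList =
            PySem.List.slice s.toList none (some ((Nat.findGreatest (fun L => 1 ≤ L ∧ QB s.toList (s.toList.dropLast.drop 1) L = true) (s.toList.length - 1) : Nat) : Int)) := by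
          simp [PySem.Str.slice]
        rw [hbr, PySem.List.slice_to _ (by omega), Int.toNat_natCast]
    · simp only [not_exists, not_and] at hex
      have hnil : (List.range s.toList.length).filterMap (fun i =>
          if (preZ s.toList).getD i 0 ≤ (PySem.List.max? ((preZ s.toList.dropLast).drop 1) (fun x => x)).getD 0 ∧
             (i : Int) + (preZ s.toList).getD i 0 = (s.toList.length : Int)
          then some ((preZ s.toList).getD i 0) else none) = [] := by
        rw [List.eq_nil_iff_forall_not_mem]
        intro x hx
        rw [cands_char s.toList hn2] at hx
        obtain ⟨L, hL1, hLn, hQ, _⟩ := hx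
        exact hex L hL1 hLn hQ
      rw [hnil]
      have hBside : faltLoop s.toList (s.toList.dropLast.drop 1) (s.toList.length - 1) = none :=
        faltLoop_none s.toList _ _ (fun L h1 h2 => hex L h1 h2)
      rw [hBside]
      rfl

-- ===== VERDICT (by name: the statement is the Claim_ definition above) =====
theorem f_spec : Claim_equal_f := by
  intro s _ hpre
  show f s = f_alt s
  apply f_eq_falt
  intro hnil
  apply hpre
  rw [← String.toList_inj, hnil]
  rfl

@[simp] theorem f_raises : Claim_raises_f := by
  unfold Claim_raises_f
  exact ⟨fun s _ hr hpre => hpre hr, by decide, by decide, by decide⟩
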